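-- pv_equiv track=rewrite | github.com/manwar/perlweeklychallenge-club | challenge-293/sgreen/python/ch-1.py | similar_dominoes
-- ===== SOURCE A (Python) =====
-- def similar_dominoes(dominoes: list) -> int:
--     count = 0
--
--     for i in range(len(dominoes)):
--         for j in range(len(dominoes)):
--             if i == j:
--                 # Don't compare the same domino!
--                 continue
--             if (dominoes[i][0] == dominoes[j][0] and dominoes[i][1] == dominoes[j][1]) \
--                     or (dominoes[i][0] == dominoes[j][1] and dominoes[i][1] == dominoes[j][0]):
--                 # There is a match
--                 count += 1
--                 break
--
--     # Return the number of matching dominoes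
--     return count
-- ===== SOURCE B (Python) =====
-- def similar_dominoes(dominoes: list) -> int:
--     # Build a frequency table of canonical (min, max) forms in one pass,
--     # then count dominoes whose canonical form occurs at least twice.
--     freq = {}
--     for d in dominoes:
--         key = (d[0], d[1]) if d[0] <= d[1] else (d[1], d[0])
--         freq[key] = freq.get(key, 0) + 1
--     count = 0
--     for d in dominoes:
--         key = (d[0], d[1]) if d[0] <= d[1] else (d[1], d[0])
--         if freq[key] >= 2:
--             count += 1
--     return count
-- ===== Notes on version B (the rewrite author's own statement) =====
-- stated objective: faster
-- what changed: Replaced the quadratic all-pairs scan with a single pass that builds a frequency table of canonical (min,max) forms and a second pass counting dominoes whose canonical form occurs at least twice.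
-- outside the precondition, e.g. on similar_dominoes([[]]): A returns 0, B raises IndexError; on similar_dominoes([[5]]): A returns 0, B raises IndexError
import Mathlib
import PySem

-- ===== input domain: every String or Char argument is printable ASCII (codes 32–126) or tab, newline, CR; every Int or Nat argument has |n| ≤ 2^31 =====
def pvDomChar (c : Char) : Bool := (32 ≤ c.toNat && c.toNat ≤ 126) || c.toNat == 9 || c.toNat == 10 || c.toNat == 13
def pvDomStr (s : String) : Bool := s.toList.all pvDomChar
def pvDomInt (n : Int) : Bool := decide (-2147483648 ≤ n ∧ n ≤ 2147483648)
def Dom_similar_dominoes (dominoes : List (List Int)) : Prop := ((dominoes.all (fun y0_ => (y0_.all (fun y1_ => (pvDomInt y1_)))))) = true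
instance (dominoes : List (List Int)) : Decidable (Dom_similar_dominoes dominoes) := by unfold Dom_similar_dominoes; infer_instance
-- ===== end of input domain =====

-- B replaces A's quadratic all-pairs scan by a frequency table of canonical (min,max)
-- forms built in one pass plus a counting pass (objective: faster).

-- ===== PORT A =====
-- dominoes[i][k] (exact inside Pre_: every inner list has length ≥ 2, every index from range(len))
def sdAt (dominoes : List (List Int)) (i k : Int) : Int :=
  PySem.List.pyGetD (PySem.List.pyGetD dominoes i []) k 0

-- the inner `for j in range(len(dominoes))` with its continue/break
def sdInner (dominoes : List (List Int)) (i : Int) : List Int → Bool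
  | [] => false
  | j :: rest =>
    if i == j then sdInner dominoes i rest
    else if (sdAt dominoes i 0 == sdAt dominoes j 0 && sdAt dominoes i 1 == sdAt dominoes j 1)
            || (sdAt dominoes i 0 == sdAt dominoes j 1 && sdAt dominoes i 1 == sdAt dominoes j 0) then
      true
    else sdInner dominoes i rest

def similar_dominoes (dominoes : List (List Int)) : Int :=
  (PySem.List.pyRange 0 dominoes.length 1).foldl
    (fun count i =>
      if sdInner dominoes i (PySem.List.pyRange 0 dominoes.length 1) then count + 1 else count)
    0

-- ===== PORT B =====
-- canonical form: (d[0], d[1]) if d[0] <= d[1] else (d[1], d[0])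
def sdKey (d : List Int) : Int × Int :=
  let a := PySem.List.pyGetD d 0 0
  let b := PySem.List.pyGetD d 1 0
  if a ≤ b then (a, b) else (b, a)

def similar_dominoes_alt (dominoes : List (List Int)) : Int :=
  let freq := dominoes.foldl
    (fun m d => m.insert (sdKey d) (m.getD (sdKey d) 0 + 1))
    (PySem.Dict.empty : PySem.Dict (Int × Int) Int)
  dominoes.foldl (fun count d => if freq.getD (sdKey d) 0 ≥ 2 then count + 1 else count) 0

-- ===== PRECONDITION & SPEC =====
-- Pre_ excludes lists containing an inner list of length < 2: there Python A raises
-- IndexError on dominoes[i][k] except in the degenerate single-domino case (where the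
-- comparison is never reached and A returns 0), while B indexes every domino up front
-- and raises.
def Pre_similar_dominoes (dominoes : List (List Int)) : Prop :=
  ∀ d ∈ dominoes, 2 ≤ d.length
instance (dominoes : List (List Int)) : Decidable (Pre_similar_dominoes dominoes) := by
  unfold Pre_similar_dominoes; infer_instance

def pvWitness_similar_dominoes : List (List Int) := [[1, 2], [2, 1], [3, 4]]

def Spec_similar_dominoes (dominoes : List (List Int)) (out : Int) : Prop :=
  out = similar_dominoes_alt dominoes
instance (dominoes : List (List Int)) (out : Int) : Decidable (Spec_similar_dominoes dominoes out) := by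
  unfold Spec_similar_dominoes; infer_instance

-- ===== CLAIM (what is proved, stated in full; the proofs are below) =====
def Claim_equal_similar_dominoes : Prop :=
  ∀ (dominoes : List (List Int)), Dom_similar_dominoes dominoes →
    Pre_similar_dominoes dominoes →
    Spec_similar_dominoes dominoes (similar_dominoes dominoes)

-- ===== LEMMAS AND PROOFS =====

-- the inner loop returns true iff some other index matches
lemma sdInner_iff (ds : List (List Int)) (i : Int) (js : List Int) :
    sdInner ds i js = true ↔
      ∃ j ∈ js, j ≠ i ∧
        ((sdAt ds i 0 = sdAt ds j 0 ∧ sdAt ds i 1 = sdAt ds j 1)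
          ∨ (sdAt ds i 0 = sdAt ds j 1 ∧ sdAt ds i 1 = sdAt ds j 0)) := by
  induction js with
  | nil => simp [sdInner]
  | cons j rest ih =>
    by_cases hij : i = j
    · subst hij
      simp only [sdInner, beq_self_eq_true, if_true, ih]
      constructor
      · rintro ⟨m, hm, hne, hmatch⟩; exact ⟨m, List.mem_cons_of_mem _ hm, hne, hmatch⟩
      · rintro ⟨m, hm, hne, hmatch⟩
        rcases List.mem_cons.mp hm with rfl | hm'
        · exact absurd rfl hne
        · exact ⟨m, hm', hne, hmatch⟩
    · have hbe : (i == j) = false := beq_eq_false_iff_ne.mpr hij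
      simp only [sdInner, hbe, Bool.false_eq_true, if_false]
      split
      · rename_i hmatch0
        have hmatch : (sdAt ds i 0 = sdAt ds j 0 ∧ sdAt ds i 1 = sdAt ds j 1)
            ∨ (sdAt ds i 0 = sdAt ds j 1 ∧ sdAt ds i 1 = sdAt ds j 0) := by
          simpa using hmatch0
        constructor
        · intro _; exact ⟨j, List.mem_cons_self, Ne.symm hij, hmatch⟩
        · intro _; rfl
      · rename_i hmatch0
        have hmatch : ¬ ((sdAt ds i 0 = sdAt ds j 0 ∧ sdAt ds i 1 = sdAt ds j 1)
            ∨ (sdAt ds i 0 = sdAt ds j 1 ∧ sdAt ds i 1 = sdAt ds j 0)) := by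
          simpa using hmatch0
        rw [ih]
        constructor
        · rintro ⟨m, hm, hne, h⟩; exact ⟨m, List.mem_cons_of_mem _ hm, hne, h⟩
        · rintro ⟨m, hm, hne, h⟩
          rcases List.mem_cons.mp hm with rfl | hm'
          · exact absurd h hmatch
          · exact ⟨m, hm', hne, h⟩

-- equal-or-reversed pairs of ints agree exactly when their sorted forms agree
lemma match_iff_key (a0 a1 b0 b1 : Int) :
    ((a0 = b0 ∧ a1 = b1) ∨ (a0 = b1 ∧ a1 = b0)) ↔
      (if a0 ≤ a1 then (a0, a1) else (a1, a0)) = (if b0 ≤ b1 then (b0, b1) else (b1, b0)) := by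
  split_ifs <;> simp [Prod.ext_iff] <;> omega

-- generic: filtering indices of range by a property of the element = filtering the list
lemma filter_range_getD {α : Type} (l : List α) (p : α → Bool) (d : α) :
    ((List.range l.length).filter (fun i => p (l.getD i d))).length = (l.filter p).length := by
  induction l with
  | nil => simp
  | cons x xs ih =>
    have hrange : List.range (xs.length + 1) = 0 :: (List.range xs.length).map Nat.succ :=
      List.range_succ_eq_map
    rw [show (x :: xs).length = xs.length + 1 from rfl, hrange,
        List.filter_cons, List.filter_map]
    have hcomp : ((fun i => p ((x :: xs).getD i d)) ∘ Nat.succ) = fun i => p (xs.getD i d) := by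
      funext i
      simp only [Function.comp_apply]
      rw [show Nat.succ i = i + 1 from rfl, List.getD_cons_succ]
    rw [hcomp, List.getD_cons_zero]
    cases hpx : p x
    · simp only [Bool.false_eq_true, if_false, List.length_map, List.filter_cons, hpx]
      exact ih
    · simp only [if_true, List.length_cons, List.length_map, List.filter_cons, hpx]
      rw [ih]

-- a nodup list containing i has length ≥ 2 iff it contains something other than i
lemma two_le_length_of_nodup {α : Type} (s : List α) (i : α) (hnd : s.Nodup) (hi : i ∈ s) :
    2 ≤ s.length ↔ ∃ j ∈ s, j ≠ i := by
  constructor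
  · intro hlen
    match s, hlen with
    | a :: b :: t, _ =>
      rcases List.nodup_cons.mp hnd with ⟨ha, _⟩
      by_cases hai : a = i
      · subst hai
        refine ⟨b, List.mem_cons_of_mem _ List.mem_cons_self, ?_⟩
        intro hbi; exact ha (by simp [hbi])
      · exact ⟨a, List.mem_cons_self, hai⟩
  · rintro ⟨j, hj, hji⟩
    match s, hi, hj with
    | [a], ha, hb =>
      simp at ha hb; subst ha; subst hb; exact absurd rfl hji
    | a :: b :: t, _, _ => simp
    | [], ha, _ => simp at ha

-- 2 ≤ count of l[i] iff some other position holds the same value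
lemma two_le_count_iff {α : Type} [BEq α] [LawfulBEq α] (l : List α) (i : Nat) (hi : i < l.length) :
    2 ≤ l.count l[i] ↔ ∃ j, ∃ hj : j < l.length, j ≠ i ∧ l[j] = l[i] := by
  have key : ∀ j (hj : j < l.length), ((l.getD j l[i] == l[i]) = true ↔ l[j] = l[i]) := by
    intro j hj
    rw [List.getD_eq_getElem l _ hj]
    simp
  have hcount : l.count l[i]
      = ((List.range l.length).filter (fun j => l.getD j l[i] == l[i])).length := by
    rw [List.count_eq_length_filter, ← filter_range_getD l (fun x => x == l[i]) l[i]]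
  have hnd : ((List.range l.length).filter (fun j => l.getD j l[i] == l[i])).Nodup :=
    List.Nodup.filter _ List.nodup_range
  have hmem : i ∈ (List.range l.length).filter (fun j => l.getD j l[i] == l[i]) :=
    List.mem_filter.mpr ⟨List.mem_range.mpr hi, (key i hi).mpr rfl⟩
  rw [hcount, two_le_length_of_nodup _ i hnd hmem]
  constructor
  · rintro ⟨j, hj, hji⟩
    obtain ⟨hjr, hjd⟩ := List.mem_filter.mp hj
    have hjlen := List.mem_range.mp hjr
    exact ⟨j, hjlen, hji, (key j hjlen).mp hjd⟩
  · rintro ⟨j, hjlen, hji, hjeq⟩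
    exact ⟨j, List.mem_filter.mpr ⟨List.mem_range.mpr hjlen, (key j hjlen).mpr hjeq⟩, hji⟩

-- reading domino m's two entries through A's index arithmetic
lemma sdAt01 (ds : List (List Int)) (m : Nat) (hm : m < ds.length) :
    sdAt ds (m : Int) 0 = ds[m].getD 0 0 ∧ sdAt ds (m : Int) 1 = ds[m].getD 1 0 := by
  unfold sdAt
  rw [PySem.List.pyGetD_natCast, List.getD_eq_getElem ds _ hm]
  exact ⟨by rw [PySem.List.pyGetD_ofNat' ds[m] 0 0], by rw [PySem.List.pyGetD_ofNat' ds[m] 1 0]⟩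

lemma sdKey_getD (d : List Int) :
    sdKey d = if d.getD 0 0 ≤ d.getD 1 0 then (d.getD 0 0, d.getD 1 0)
              else (d.getD 1 0, d.getD 0 0) := by
  unfold sdKey
  rw [PySem.List.pyGetD_ofNat' d 0 0, PySem.List.pyGetD_ofNat' d 1 0]

-- A's match condition between positions m and j is equality of B's canonical keys
lemma sdMatch_iff_sdKey (ds : List (List Int)) (m j : Nat)
    (hm : m < ds.length) (hj : j < ds.length) :
    ((sdAt ds (m : Int) 0 = sdAt ds (j : Int) 0 ∧ sdAt ds (m : Int) 1 = sdAt ds (j : Int) 1)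
      ∨ (sdAt ds (m : Int) 0 = sdAt ds (j : Int) 1 ∧ sdAt ds (m : Int) 1 = sdAt ds (j : Int) 0))
    ↔ sdKey ds[m] = sdKey ds[j] := by
  rw [(sdAt01 ds m hm).1, (sdAt01 ds m hm).2, (sdAt01 ds j hj).1, (sdAt01 ds j hj).2,
      sdKey_getD, sdKey_getD]
  exact match_iff_key _ _ _ _

-- B's result as a filter over the canonical key list
lemma alt_eq_filter (ds : List (List Int)) :
    similar_dominoes_alt ds
      = (((ds.map sdKey).filter (fun k => decide (2 ≤ (ds.map sdKey).count k))).length : Int) := by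
  have hfreq : ∀ d : List Int,
      (ds.foldl (fun m d => m.insert (sdKey d) (m.getD (sdKey d) 0 + 1))
        (PySem.Dict.empty : PySem.Dict (Int × Int) Int)).getD (sdKey d) 0
        = ((ds.map sdKey).count (sdKey d) : Int) := by
    intro d
    rw [show (ds.foldl (fun m d => m.insert (sdKey d) (m.getD (sdKey d) 0 + 1))
            (PySem.Dict.empty : PySem.Dict (Int × Int) Int))
          = ((ds.map sdKey).foldl (fun m k => m.insert k (m.getD k 0 + 1))
              (PySem.Dict.empty : PySem.Dict (Int × Int) Int))
        from (List.foldl_map (f := sdKey)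
            (g := fun (m : PySem.Dict (Int × Int) Int) k => m.insert k (m.getD k 0 + 1))
            (l := ds) (init := (PySem.Dict.empty : PySem.Dict (Int × Int) Int))).symm,
      PySem.Dict.getD_foldl_insert_add_one]
    simp
  simp only [similar_dominoes_alt]
  rw [PySem.List.foldl_ite_add_one, List.countP_eq_length_filter]
  have hcong : ds.filter (fun d => decide
        ((ds.foldl (fun m d => m.insert (sdKey d) (m.getD (sdKey d) 0 + 1))
          (PySem.Dict.empty : PySem.Dict (Int × Int) Int)).getD (sdKey d) 0 ≥ 2))
      = ds.filter ((fun k => decide (2 ≤ (ds.map sdKey).count k)) ∘ sdKey) := by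
    apply List.filter_congr
    intro d _
    rw [Function.comp_apply]
    simp only [hfreq d, ge_iff_le, decide_eq_decide]
    exact_mod_cast Iff.rfl
  rw [zero_add, hcong, List.filter_map, List.length_map]

-- ===== VERDICT (by name: the statement is the Claim_ definition above) =====
theorem similar_dominoes_spec : Claim_equal_similar_dominoes := by
  intro ds _ _
  unfold Spec_similar_dominoes
  rw [alt_eq_filter]
  simp only [similar_dominoes]
  rw [PySem.List.foldl_if_add_one, List.countP_eq_length_filter, zero_add]
  congr 1
  rw [PySem.List.pyRange_one, List.filter_map, List.length_map,
      show ((ds.length : Int) - 0).toNat = ds.length by simp]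
  -- pointwise: index m matches somewhere else  ↔  its key occurs twice in the key list
  have hpoint : ∀ m ∈ List.range ds.length,
      ((fun i => sdInner ds i ((List.range ds.length).map (fun k => (0 : Int) + ↑k)))
          ∘ fun k => (0 : Int) + ↑k) m
        = decide (2 ≤ (ds.map sdKey).count ((ds.map sdKey).getD m (0, 0))) := by
    intro m hm
    have hmlt : m < ds.length := List.mem_range.mp hm
    have hmks : m < (ds.map sdKey).length := by simpa using hmlt
    have hget : (ds.map sdKey).getD m (0, 0) = sdKey ds[m] := by
      rw [List.getD_eq_getElem _ _ hmks, List.getElem_map]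
    rw [Function.comp_apply, zero_add, Bool.eq_iff_iff, decide_eq_true_eq, sdInner_iff, hget]
    have hcnt := two_le_count_iff (ds.map sdKey) m hmks
    rw [List.getElem_map] at hcnt
    rw [hcnt]
    constructor
    · rintro ⟨j, hjmem, hjne, hmatch⟩
      obtain ⟨jn, hjr, rfl⟩ := List.mem_map.mp hjmem
      have hjn : jn < ds.length := List.mem_range.mp hjr
      rw [zero_add] at hjne hmatch
      refine ⟨jn, by simpa using hjn, ?_, ?_⟩
      · intro h; exact hjne (by exact_mod_cast congrArg Nat.cast h)
      · rw [List.getElem_map]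
        exact ((sdMatch_iff_sdKey ds m jn hmlt hjn).mp hmatch).symm
    · rintro ⟨j, hjks, hjne, hjeq⟩
      have hjn : j < ds.length := by simpa using hjks
      rw [List.getElem_map] at hjeq
      refine ⟨(0 : Int) + (j : Int),
        List.mem_map.mpr ⟨j, List.mem_range.mpr hjn, rfl⟩, ?_, ?_⟩
      · rw [zero_add]
        intro h
        exact hjne (by exact_mod_cast h)
      · rw [zero_add]
        exact (sdMatch_iff_sdKey ds m j hmlt hjn).mpr hjeq.symm
  rw [List.filter_congr hpoint,
      show List.range ds.length = List.range (ds.map sdKey).length by simp]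
  exact filter_range_getD (ds.map sdKey)
    (fun k => decide (2 ≤ (ds.map sdKey).count k)) ((0 : Int), (0 : Int))
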